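-- pv_equiv track=rewrite | github.com/larryhastings/pyweek26 | src/game.py | enumerate_outside_in
-- ===== SOURCE A (Python) =====
-- def enumerate_outside_in(iterable):
--     l = list(iterable)
--     offset = 0
--     while l:
--         o = l.pop(0)
--         yield offset, o
--         if not l:
--             break
--         o = l.pop(-1)
--         yield offset + len(l) + 1, o
--         offset += 1
-- ===== SOURCE B (Python) =====
-- def enumerate_outside_in(iterable):
--     xs = list(iterable)
--     i, j = 0, len(xs) - 1
--     while i < j:
--         yield i, xs[i]
--         yield j, xs[j]
--         i += 1
--         j -= 1
--     if i == j:
--         yield i, xs[i]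
-- ===== Notes on version B (the rewrite author's own statement) =====
-- stated objective: faster
-- what changed: Replaced the list-consuming loop (pop(0)/pop(-1), each O(n)) by a two-pointer index scan over the unmodified list, yielding the same (index, element) pairs in O(n).
import Mathlib
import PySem

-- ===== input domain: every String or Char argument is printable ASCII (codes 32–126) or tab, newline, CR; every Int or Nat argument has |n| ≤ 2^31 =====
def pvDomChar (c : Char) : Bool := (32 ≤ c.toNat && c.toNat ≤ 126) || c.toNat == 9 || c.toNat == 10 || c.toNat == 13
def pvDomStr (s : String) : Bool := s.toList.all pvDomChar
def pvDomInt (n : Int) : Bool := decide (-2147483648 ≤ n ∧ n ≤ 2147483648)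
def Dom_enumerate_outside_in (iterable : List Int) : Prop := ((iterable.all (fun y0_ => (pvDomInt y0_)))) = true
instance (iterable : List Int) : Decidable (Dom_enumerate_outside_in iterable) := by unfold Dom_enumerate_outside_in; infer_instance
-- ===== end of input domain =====

-- B replaces A's pop(0)/pop(-1) list-consuming loop by a two-pointer index scan over the
-- unmodified list; the returned sequence of (index, element) pairs is identical.

-- ===== PORT A =====
-- while l: o = l.pop(0); yield (offset, o); if not l: break;
--          o = l.pop(-1); yield (offset + len(l) + 1, o); offset += 1
def eoiLoop (l : List Int) (offset : Int) : List (Int × Int) :=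
  match l with
  | [] => []
  | o :: rest =>
    if h : rest = [] then [(offset, o)]
    else
      -- l.pop(-1): rest.getLast is the popped element, rest.dropLast the remaining list
      (offset, o) :: ((offset + (rest.dropLast.length : Int) + 1, rest.getLast h) ::
        eoiLoop rest.dropLast (offset + 1))
termination_by l.length
decreasing_by simp [List.length_dropLast]

def enumerate_outside_in (iterable : List Int) : List (Int × Int) := eoiLoop iterable 0

-- ===== PORT B =====
-- i, j = 0, len(xs)-1; while i < j: yield (i, xs[i]); yield (j, xs[j]); i += 1; j -= 1
-- if i == j: yield (i, xs[i])
-- (xs[i] ported as pyGetD with default 0: every index the loop reads is in range)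
def eoiAltLoop (xs : List Int) (i j : Int) : List (Int × Int) :=
  if i < j then
    (i, PySem.List.pyGetD xs i 0) :: (j, PySem.List.pyGetD xs j 0) :: eoiAltLoop xs (i + 1) (j - 1)
  else if i = j then [(i, PySem.List.pyGetD xs i 0)]
  else []
termination_by (j - i + 1).toNat
decreasing_by omega

def enumerate_outside_in_alt (iterable : List Int) : List (Int × Int) :=
  eoiAltLoop iterable 0 (PySem.List.len iterable - 1)

-- ===== PRECONDITION & SPEC =====
def Spec_enumerate_outside_in (iterable : List Int) (out : List (Int × Int)) : Prop := out = enumerate_outside_in_alt iterable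
instance (iterable : List Int) (out : List (Int × Int)) : Decidable (Spec_enumerate_outside_in iterable out) := by unfold Spec_enumerate_outside_in; infer_instance

-- ===== CLAIM (what is proved, stated in full; the proofs are below) =====
def Claim_equal_enumerate_outside_in : Prop := ∀ (iterable : List Int), Dom_enumerate_outside_in iterable → Spec_enumerate_outside_in iterable (enumerate_outside_in iterable)

-- ===== LEMMAS AND PROOFS =====

-- xs[i+1] on (x :: ys) reads ys[i] (0 ≤ i)
theorem pyGetD_cons_add_one (x : Int) (ys : List Int) (i : Int) (hi : 0 ≤ i) :
    PySem.List.pyGetD (x :: ys) (i + 1) 0 = PySem.List.pyGetD ys i 0 := by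
  simp only [PySem.List.pyGetD]
  rw [PySem.List.pyGet?_of_nonneg (x :: ys) (show (0:Int) ≤ i + 1 by omega),
    PySem.List.pyGet?_of_nonneg ys hi, show (i + 1).toNat = i.toNat + 1 by omega]
  simp

-- in-range reads ignore an appended last element
theorem pyGetD_append_last (ys : List Int) (z : Int) (k : Int) (hk0 : 0 ≤ k)
    (hk : k < (ys.length : Int)) :
    PySem.List.pyGetD (ys ++ [z]) k 0 = PySem.List.pyGetD ys k 0 := by
  simp only [PySem.List.pyGetD]
  rw [PySem.List.pyGet?_of_nonneg (ys ++ [z]) hk0, PySem.List.pyGet?_of_nonneg ys hk0,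
    List.getElem?_append_left (by omega)]

-- xs[len ys] on (ys ++ [z]) reads z
theorem pyGetD_append_len (ys : List Int) (z : Int) :
    PySem.List.pyGetD (ys ++ [z]) (ys.length : Int) 0 = z := by
  simp only [PySem.List.pyGetD]
  rw [show ys ++ [z] = ys ++ z :: [] from rfl, PySem.List.pyGet?_append_length ys [] z]
  rfl

-- shifting the window by one over a cons adds one to every produced index
theorem eoiAltLoop_cons_shift (x : Int) (ys : List Int) (i j : Int) (hi : 0 ≤ i) :
    eoiAltLoop (x :: ys) (i + 1) (j + 1)
      = (eoiAltLoop ys i j).map (fun p => (p.1 + 1, p.2)) := by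
  fun_induction eoiAltLoop ys i j with
  | case1 i j hij ih =>
    rw [eoiAltLoop, if_pos (show i + 1 < j + 1 by omega)]
    rw [pyGetD_cons_add_one x ys i hi, pyGetD_cons_add_one x ys j (by omega)]
    rw [show j + 1 - 1 = j - 1 + 1 by omega, ih (by omega)]
    simp
  | case2 i h1 =>
    rw [eoiAltLoop, if_neg (show ¬ i + 1 < i + 1 by omega), if_pos rfl]
    rw [pyGetD_cons_add_one x ys i hi]
    simp
  | case3 i j h1 h2 =>
    rw [eoiAltLoop, if_neg (show ¬ i + 1 < j + 1 by omega),
      if_neg (show ¬ i + 1 = j + 1 by omega)]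
    simp

-- a window strictly inside ys does not see an appended last element
theorem eoiAltLoop_append_last (ys : List Int) (z : Int) (i j : Int) (hi : 0 ≤ i)
    (hj : j < (ys.length : Int)) :
    eoiAltLoop (ys ++ [z]) i j = eoiAltLoop ys i j := by
  fun_induction eoiAltLoop ys i j with
  | case1 i j hij ih =>
    rw [eoiAltLoop, if_pos hij]
    rw [pyGetD_append_last ys z i hi (by omega), pyGetD_append_last ys z j (by omega) hj,
      ih (by omega) (by omega)]
  | case2 i h1 =>
    rw [eoiAltLoop, if_neg h1, if_pos rfl]
    rw [pyGetD_append_last ys z i hi (by omega)]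
  | case3 i j h1 h2 =>
    rw [eoiAltLoop, if_neg h1, if_neg h2]

theorem eoiLoop_eq_alt : ∀ (n : Nat) (l : List Int), l.length = n → ∀ (offset : Int),
    eoiLoop l offset
      = (eoiAltLoop l 0 ((l.length : Int) - 1)).map (fun p => (p.1 + offset, p.2)) := by
  intro n
  induction n using Nat.strong_induction_on with
  | _ n ih =>
    intro l hl offset
    match l with
    | [] => rw [eoiLoop, eoiAltLoop]; simp
    | [x] =>
      rw [eoiLoop, eoiAltLoop]
      simp [PySem.List.pyGetD_zero_cons]
    | x :: y :: rest' =>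
      have hr : (y :: rest') ≠ [] := by simp
      set rest := y :: rest' with hrest
      set init := rest.dropLast with hinit
      set lst := rest.getLast hr with hlst
      have hsplit : init ++ [lst] = rest := List.dropLast_append_getLast hr
      have hmlen : rest.length = init.length + 1 := by
        rw [← hsplit]; simp
      -- unfold A's loop step
      rw [eoiLoop]
      simp only [dif_neg hr]
      -- unfold B's loop step
      have hlen : ((x :: rest).length : Int) - 1 = (init.length : Int) + 1 := by
        simp [hmlen]
      rw [hlen, eoiAltLoop, if_pos (show (0:Int) < (init.length : Int) + 1 by omega)]
      rw [PySem.List.pyGetD_zero_cons]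
      have hget2 : PySem.List.pyGetD (x :: rest) ((init.length : Int) + 1) 0 = lst := by
        rw [pyGetD_cons_add_one x rest (init.length : Int) (by omega), ← hsplit,
          pyGetD_append_len]
      rw [hget2]
      have hshift : eoiAltLoop (x :: rest) (0 + 1) (((init.length : Int) - 1) + 1)
          = (eoiAltLoop rest 0 ((init.length : Int) - 1)).map (fun p => (p.1 + 1, p.2)) :=
        eoiAltLoop_cons_shift x rest 0 ((init.length : Int) - 1) le_rfl
      rw [show (init.length : Int) + 1 - 1 = ((init.length : Int) - 1) + 1 by omega, hshift]
      have hdrop : eoiAltLoop rest 0 ((init.length : Int) - 1) = eoiAltLoop init 0 ((init.length : Int) - 1) := by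
        rw [← hsplit]
        exact eoiAltLoop_append_last init lst 0 ((init.length : Int) - 1) le_rfl (by omega)
      rw [hdrop]
      have hih := ih init.length (by omega) init rfl (offset + 1)
      rw [hih]
      simp only [List.map_cons, List.map_map, List.cons.injEq]
      refine ⟨by simp, by simp; omega, ?_⟩
      apply List.map_congr_left
      intro p _
      simp [Function.comp]
      omega

-- ===== VERDICT (by name: the statement is the Claim_ definition above) =====
theorem enumerate_outside_in_spec : Claim_equal_enumerate_outside_in := by
  intro iterable _
  show eoiLoop iterable 0 = enumerate_outside_in_alt iterable
  rw [eoiLoop_eq_alt iterable.length iterable rfl 0]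
  unfold enumerate_outside_in_alt
  rw [PySem.List.len_eq]
  simp
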